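/- GENERATED by farm/mkstatement.py from design/units.tsv (unit `start_decoder.C11f`) and the assertions of Vorbis/Spec/StartDecoderC11.lean — do not edit.
   THE STATEMENT of the proof unit `start_decoder.C11f`: segment C11f of `start_decoder` (10 instructions; entries 0x114ca3;
   exits 0x114db9,0x114cd0; ranges 0x114ca3-0x114ccb)
   takes each of its entry assertions to one of its exit assertions (`Vorbis.Spec.StartDecoder.SegC11f`), given the contracts of its callees.
   What the names mean: Vorbis/Spec/Basic.lean (the shared hypotheses), Vorbis/Spec/StartDecoderC11.lean (the assertions). The theorem to prove:
   `theorem start_decoder_C11f_ok : Vorbis.Spec.start_decoder_C11f.Statement`. -/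
import Vorbis.Spec.Reader
import Vorbis.Spec.StartDecoderC11
namespace Vorbis.Spec.start_decoder_C11f
open X86 X86.User Asan

/-- The statement of unit `start_decoder.C11f`. -/
def Statement : Prop :=
  ∀ (Lay : Layout) (_hLay : Lay.hi = 0x1000000) (μ : Microarch) (_hμ : UserX.MicroOK μ) (u₀ : State)
    (_hcode : HasCodeNat Lay u₀ Vorbis.L.start_decoder.entry Vorbis.Code.code_start_decoder.nat Vorbis.L.start_decoder.size)
    (_h_get_bits : ∀ (others : List Obj) (frames : List (Nat × FrameLayout)) (Blk : Block → Prop) (len : Nat), Calls Lay μ Vorbis.WayInv (Vorbis.conv u₀) Vorbis.L.get_bits.entry (Vorbis.Spec.get_bits.spec others frames Blk len))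
    (_h_asan_load1_noabort : Asan.SmallCheck Lay μ Vorbis.WayInv (Vorbis.CodeOK u₀) [.rax, .rdx] 1 Vorbis.L.__asan_load1_noabort.entry)
    (_h_asan_load4_noabort : Asan.SmallCheck Lay μ Vorbis.WayInv (Vorbis.CodeOK u₀) [.rax, .rcx, .rdx] 4 Vorbis.L.__asan_load4_noabort.entry),
    Vorbis.Spec.StartDecoder.SegC11f Lay μ u₀

end Vorbis.Spec.start_decoder_C11f
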